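-- pv_equiv track=rewrite | github.com/abfist/home-assistant-hebrew-calendar | custom_components/hebrew_calendar/HebrewDateConverter.py | _number_to_hebrew_letters
-- ===== SOURCE A (Python) =====
-- def _number_to_hebrew_letters(num: int) -> str:
--     """
--     המרת מספר לאותיות עבריות (גימטריה).
--     משמש לתצוגת תאריכים עבריים.
--     """
--     if num <= 0 or num > 9999:
--         return str(num)
--
--     letters = [
--         (400, "ת"), (300, "ש"), (200, "ר"), (100, "ק"),
--         (90, "צ"), (80, "פ"), (70, "ע"), (60, "ס"), (50, "נ"),
--         (40, "מ"), (30, "ל"), (20, "כ"), (10, "י"),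
--         (9, "ט"), (8, "ח"), (7, "ז"), (6, "ו"), (5, "ה"),
--         (4, "ד"), (3, "ג"), (2, "ב"), (1, "א"),
--     ]
--
--     # טיפול במקרים מיוחדים (15 ו-16)
--     result = ""
--     if num % 100 == 15:
--         num -= 15
--         result = "ט״ו"
--     elif num % 100 == 16:
--         num -= 16
--         result = "ט״ז"
--
--     parts = []
--     for value, letter in letters:
--         while num >= value:
--             parts.append(letter)
--             num -= value
--
--     # הוספת גרשיים/גרש
--     if parts:
--         if len(parts) == 1:
--             result = "".join(parts) + "׳" + result
--         else:
--             result = "".join(parts[:-1]) + "״" + parts[-1] + result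
--
--     return result
-- ===== SOURCE B (Python) =====
-- # Digit-decomposition rewrite: divmod into hundreds/tens/units with lookup tables
-- # instead of the greedy subtraction loop over the value table.
-- def _number_to_hebrew_letters(num: int) -> str:
--     if num <= 0 or num > 9999:
--         return str(num)
--
--     tail = ""
--     if num % 100 == 15:
--         num -= 15
--         tail = "ט״ו"
--     elif num % 100 == 16:
--         num -= 16
--         tail = "ט״ז"
--
--     units = "אבגדהוזחט"
--     tens = "יכלמנסעפצ"
--     hundreds = ["", "ק", "ר", "ש"]
--
--     h, r = divmod(num, 100)
--     t, u = divmod(r, 10)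
--     parts = "ת" * (h // 4) + hundreds[h % 4]
--     if t:
--         parts += tens[t - 1]
--     if u:
--         parts += units[u - 1]
--
--     if not parts:
--         return tail
--     if len(parts) == 1:
--         return parts + "׳" + tail
--     return parts[:-1] + "״" + parts[-1] + tail
-- ===== Notes on version B (the rewrite author's own statement) =====
-- stated objective: alternative
-- what changed: A greedily subtracts values from the full letter-value table with nested while loops; B decomposes the number with divmod into hundreds/tens/units digits and builds the letters from three small lookup tables ('ת'*(h//4) plus hundreds[h%4]), with no subtraction loop.
import Mathlib
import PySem

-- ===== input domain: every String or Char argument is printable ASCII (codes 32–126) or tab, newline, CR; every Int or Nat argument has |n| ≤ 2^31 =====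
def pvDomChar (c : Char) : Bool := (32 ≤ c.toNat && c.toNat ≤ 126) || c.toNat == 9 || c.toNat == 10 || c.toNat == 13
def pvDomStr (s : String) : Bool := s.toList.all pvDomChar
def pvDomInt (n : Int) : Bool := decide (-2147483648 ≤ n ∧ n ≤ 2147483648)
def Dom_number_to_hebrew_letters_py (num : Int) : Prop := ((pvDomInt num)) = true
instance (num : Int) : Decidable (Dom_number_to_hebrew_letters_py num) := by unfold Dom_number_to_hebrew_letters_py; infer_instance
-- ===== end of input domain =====

-- B replaces A's greedy subtraction loop over the 22-entry value table by a direct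
-- divmod digit decomposition (hundreds as 'ת'*(h//4) plus a lookup, tens, units).


-- ===== PORT A =====
-- the body of Python's 'while num >= value: parts.append(letter); num -= value';
-- the fuel argument only makes the recursion structural (every value in the table is
-- ≥ 1, so the loop terminates and the fuel chosen in pvWhileA is never exhausted)
def pvWhileAF : Nat → Int → List Char → List (List Char) → Int → List (List Char) × Int
  | 0, _, _, parts, num => (parts, num)
  | fuel+1, value, letter, parts, num =>
      if value ≤ num then pvWhileAF fuel value letter (parts ++ [letter]) (num - value)
      else (parts, num)

-- one 'while num >= value' loop on the state (parts, num)
def pvWhileA (value : Int) (letter : List Char) : List (List Char) × Int → List (List Char) × Int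
  | (parts, num) => pvWhileAF ((PySem.Int.floordiv num value).toNat + 1) value letter parts num

def pvLettersA : List (Int × List Char) :=
  [(400, ['ת']), (300, ['ש']), (200, ['ר']), (100, ['ק']),
   (90, ['צ']), (80, ['פ']), (70, ['ע']), (60, ['ס']), (50, ['נ']),
   (40, ['מ']), (30, ['ל']), (20, ['כ']), (10, ['י']),
   (9, ['ט']), (8, ['ח']), (7, ['ז']), (6, ['ו']), (5, ['ה']),
   (4, ['ד']), (3, ['ג']), (2, ['ב']), (1, ['א'])]

-- 'for value, letter in letters: while …'
def pvStepA (st : List (List Char) × Int) (p : Int × List Char) : List (List Char) × Int :=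
  pvWhileA p.1 p.2 st

def number_to_hebrew_letters_py (num : Int) : String :=
  if num ≤ 0 ∨ 9999 < num then PySem.Int.toStr num
  else
    let s : List Char × Int :=
      if PySem.Int.mod num 100 = 15 then (['ט', '״', 'ו'], num - 15)
      else if PySem.Int.mod num 100 = 16 then (['ט', '״', 'ז'], num - 16)
      else ([], num)
    let st := pvLettersA.foldl pvStepA ([], s.2)
    let parts := st.1
    if parts ≠ [] then
      if parts.length = 1 then
        String.ofList (PySem.Chars.join [] parts ++ ['׳'] ++ s.1)
      else
        String.ofList (PySem.Chars.join [] (PySem.List.slice parts none (some (-1))) ++ ['״']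
          ++ (PySem.List.pyGet? parts (-1)).getD [] ++ s.1)
    else String.ofList s.1

-- ===== PORT B =====
-- B's digit decomposition of the letter block: 'ת' * (h//4) ++ hundreds[h%4], tens, units
def pvPartsB (num : Int) : List Char :=
  let units : List Char := ['א', 'ב', 'ג', 'ד', 'ה', 'ו', 'ז', 'ח', 'ט']
  let tens : List Char := ['י', 'כ', 'ל', 'מ', 'נ', 'ס', 'ע', 'פ', 'צ']
  let hundreds : List (List Char) := [[], ['ק'], ['ר'], ['ש']]
  let h := PySem.Int.floordiv num 100
  let r := PySem.Int.mod num 100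
  let t := PySem.Int.floordiv r 10
  let u := PySem.Int.mod r 10
  let parts0 := List.replicate (PySem.Int.floordiv h 4).toNat 'ת'
    ++ (PySem.List.pyGet? hundreds (PySem.Int.mod h 4)).getD []
  let parts1 := if t ≠ 0 then parts0 ++ [(PySem.List.pyGet? tens (t - 1)).getD ' '] else parts0
  if u ≠ 0 then parts1 ++ [(PySem.List.pyGet? units (u - 1)).getD ' '] else parts1

def number_to_hebrew_letters_py_alt (num : Int) : String :=
  if num ≤ 0 ∨ 9999 < num then PySem.Int.toStr num
  else
    let s : List Char × Int :=
      if PySem.Int.mod num 100 = 15 then (['ט', '״', 'ו'], num - 15)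
      else if PySem.Int.mod num 100 = 16 then (['ט', '״', 'ז'], num - 16)
      else ([], num)
    let parts := pvPartsB s.2
    if parts = [] then String.ofList s.1
    else if parts.length = 1 then String.ofList (parts ++ ['׳'] ++ s.1)
    else String.ofList (PySem.List.slice parts none (some (-1)) ++ ['״']
      ++ [(PySem.List.pyGet? parts (-1)).getD ' '] ++ s.1)

-- ===== PRECONDITION & SPEC =====
def Spec_number_to_hebrew_letters_py (num : Int) (out : String) : Prop := out = number_to_hebrew_letters_py_alt num
instance (num : Int) (out : String) : Decidable (Spec_number_to_hebrew_letters_py num out) := by unfold Spec_number_to_hebrew_letters_py; infer_instance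

-- ===== CLAIM (what is proved, stated in full; the proofs are below) =====
def Claim_equal_number_to_hebrew_letters_py : Prop := ∀ (num : Int), Dom_number_to_hebrew_letters_py num → Spec_number_to_hebrew_letters_py num (number_to_hebrew_letters_py num)

-- ===== LEMMAS AND PROOFS =====

-- closed form of one while loop, given enough fuel
lemma pvWhileAF_closed (fuel : Nat) (v : Int) (l : List Char) (parts : List (List Char)) (num : Int)
    (hv : 0 < v) (hn : 0 ≤ num) (hf : (PySem.Int.floordiv num v).toNat < fuel) :
    pvWhileAF fuel v l parts num
      = (parts ++ List.replicate (PySem.Int.floordiv num v).toNat l, PySem.Int.mod num v) := by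
  rw [PySem.Int.floordiv_eq_ediv_of_pos hv] at hf ⊢
  rw [PySem.Int.mod_eq_emod_of_pos hv]
  induction fuel generalizing parts num with
  | zero => omega
  | succ fuel ih =>
    rw [pvWhileAF]
    by_cases h : v ≤ num
    · have hdiv : (num - v) / v = num / v - 1 := by
        have := Int.add_mul_ediv_right num (-1) (by omega : v ≠ 0)
        simp [sub_eq_add_neg, neg_mul] at this ⊢; omega
      have hmod : (num - v) % v = num % v := by
        exact Int.sub_emod_right num v
      have hq : 1 ≤ num / v := by
        have h1 := Int.ediv_le_ediv hv h
        rwa [Int.ediv_self (by omega)] at h1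
      rw [if_pos h, ih (parts ++ [l]) (num - v) (by omega) (by rw [hdiv]; omega)]
      rw [hdiv, hmod]
      have : (num / v).toNat = ((num / v - 1).toNat) + 1 := by omega
      rw [this, List.replicate_succ, List.append_assoc]
      rfl
    · have hq : num / v = 0 := Int.ediv_eq_zero_of_lt hn (by omega)
      have hm : num % v = num := Int.emod_eq_of_lt hn (by omega)
      rw [if_neg h, hq, hm]
      simp

lemma pvWhileA_closed (v : Int) (l : List Char) (parts : List (List Char)) (num : Int)
    (hv : 0 < v) (hn : 0 ≤ num) :
    pvWhileA v l (parts, num)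
      = (parts ++ List.replicate (PySem.Int.floordiv num v).toNat l, PySem.Int.mod num v) := by
  rw [pvWhileA]
  exact pvWhileAF_closed _ v l parts num hv hn (by omega)

-- the fold over the letter table only appends to parts
lemma pvFold_append (ls : List (Int × List Char)) (hls : ∀ p ∈ ls, 0 < p.1)
    (parts : List (List Char)) (num : Int) (hn : 0 ≤ num) :
    ls.foldl pvStepA (parts, num)
      = (parts ++ (ls.foldl pvStepA ([], num)).1, (ls.foldl pvStepA ([], num)).2) := by
  induction ls generalizing parts num with
  | nil => simp
  | cons p tl ih =>
    have hp : 0 < p.1 := hls p (List.mem_cons_self ..)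
    have htl : ∀ q ∈ tl, 0 < q.1 := fun q hq => hls q (List.mem_cons_of_mem _ hq)
    have hm : 0 ≤ PySem.Int.mod num p.1 := PySem.Int.mod_nonneg _ hp
    simp only [List.foldl_cons, pvStepA]
    rw [pvWhileA_closed p.1 p.2 parts num hp hn,
        pvWhileA_closed p.1 p.2 [] num hp hn,
        ih htl _ _ hm]
    rw [List.nil_append, ih htl (List.replicate (PySem.Int.floordiv num p.1).toNat p.2) _ hm]
    simp [List.append_assoc]

-- B's parts split off the 'ת' (400) prefix
lemma pvPartsB_split (k : Nat) (r : Int) (hr : 0 ≤ r) (hr4 : r < 400) :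
    pvPartsB (400 * (k : Int) + r) = List.replicate k 'ת' ++ pvPartsB r := by
  have d100 : (0:Int) < 100 := by omega
  have d10 : (0:Int) < 10 := by omega
  have d4 : (0:Int) < 4 := by omega
  simp only [pvPartsB, PySem.Int.floordiv_eq_ediv_of_pos d100,
    PySem.Int.floordiv_eq_ediv_of_pos d10, PySem.Int.floordiv_eq_ediv_of_pos d4,
    PySem.Int.mod_eq_emod_of_pos d100, PySem.Int.mod_eq_emod_of_pos d10,
    PySem.Int.mod_eq_emod_of_pos d4]
  have e1 : (400 * (k:Int) + r) % 100 = r % 100 := by omega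
  have e2 : (400 * (k:Int) + r) / 100 / 4 = (k:Int) := by omega
  have e3 : (400 * (k:Int) + r) / 100 % 4 = r / 100 := by omega
  have e4 : r / 100 / 4 = 0 := by omega
  have e5 : r / 100 % 4 = r / 100 := by omega
  rw [e1, e2, e3, e4, e5]
  simp only [Int.toNat_natCast, Int.toNat_zero, List.replicate_zero, List.nil_append]
  split_ifs <;> simp [List.append_assoc]

-- the 21 letters after (400, 'ת')
def pvRestA : List (Int × List Char) :=
  [(300, ['ש']), (200, ['ר']), (100, ['ק']),
   (90, ['צ']), (80, ['פ']), (70, ['ע']), (60, ['ס']), (50, ['נ']),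
   (40, ['מ']), (30, ['ל']), (20, ['כ']), (10, ['י']),
   (9, ['ט']), (8, ['ח']), (7, ['ז']), (6, ['ו']), (5, ['ה']),
   (4, ['ד']), (3, ['ג']), (2, ['ב']), (1, ['א'])]

lemma pvLettersA_eq : pvLettersA = (400, ['ת']) :: pvRestA := rfl

lemma pvRestA_pos : ∀ p ∈ pvRestA, 0 < p.1 := by decide

-- residual check: for 0 ≤ r < 400 the 21 remaining greedy loops produce exactly
-- B's hundreds/tens/units letters (as singleton strings)
set_option maxRecDepth 40000 in
lemma pvResidual : (List.range 400).all (fun r =>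
    ((pvRestA.foldl pvStepA ([], (Int.ofNat r))).1
      == (pvPartsB (Int.ofNat r)).map (fun c => [c]))) = true := by
  decide

-- A's parts list = B's parts string (as singleton strings), for every 0 ≤ n
lemma pvParts_eq (n : Int) (hn : 0 ≤ n) :
    (pvLettersA.foldl pvStepA ([], n)).1 = (pvPartsB n).map (fun c => [c]) := by
  have h400 : (0:Int) < 400 := by omega
  have hrn : 0 ≤ PySem.Int.mod n 400 := PySem.Int.mod_nonneg _ h400
  have hrl : PySem.Int.mod n 400 < 400 := PySem.Int.mod_lt _ h400
  have hq : 0 ≤ PySem.Int.floordiv n 400 := by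
    rw [PySem.Int.floordiv_eq_ediv_of_pos h400]; exact Int.ediv_nonneg hn (by omega)
  have hres := pvResidual
  rw [List.all_eq_true] at hres
  have hmem : (PySem.Int.mod n 400).toNat ∈ List.range 400 := by
    rw [List.mem_range]; omega
  have hres' := hres _ hmem
  rw [beq_iff_eq] at hres'
  have hcast : Int.ofNat (PySem.Int.mod n 400).toNat = PySem.Int.mod n 400 := by
    rw [Int.ofNat_eq_natCast, Int.toNat_of_nonneg hrn]
  rw [hcast] at hres'
  rw [pvLettersA_eq, List.foldl_cons]
  have hstep : pvStepA ([], n) (400, ['ת'])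
      = (List.replicate (PySem.Int.floordiv n 400).toNat ['ת'], PySem.Int.mod n 400) := by
    rw [pvStepA, pvWhileA_closed _ _ _ _ h400 hn, List.nil_append]
  rw [hstep, pvFold_append pvRestA pvRestA_pos _ _ hrn, hres']
  have hsplit := pvPartsB_split (PySem.Int.floordiv n 400).toNat (PySem.Int.mod n 400) hrn hrl
  have hn400 : 400 * ((PySem.Int.floordiv n 400).toNat : Int) + PySem.Int.mod n 400 = n := by
    have := PySem.Int.floordiv_mul_add_mod n 400
    omega
  rw [hn400] at hsplit
  rw [hsplit]
  simp [List.map_replicate]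

-- the geresh/gershayim assembly agrees on a parts list of singletons vs the flat chars
lemma pvAssemble (pb : List Char) (tl : List Char) :
    (if (pb.map fun c => [c]) ≠ [] then
       if (pb.map fun c => [c]).length = 1 then
         String.ofList (PySem.Chars.join [] (pb.map fun c => [c]) ++ ['׳'] ++ tl)
       else
         String.ofList (PySem.Chars.join [] (PySem.List.slice (pb.map fun c => [c]) none (some (-1))) ++ ['״']
           ++ (PySem.List.pyGet? (pb.map fun c => [c]) (-1)).getD [] ++ tl)
     else String.ofList tl)
    = (if pb = [] then String.ofList tl
       else if pb.length = 1 then String.ofList (pb ++ ['׳'] ++ tl)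
       else String.ofList (PySem.List.slice pb none (some (-1)) ++ ['״']
         ++ [(PySem.List.pyGet? pb (-1)).getD ' '] ++ tl)) := by
  by_cases h0 : pb = []
  · subst h0; simp
  · rw [if_neg h0, if_pos (by simpa using h0)]
    by_cases h1 : pb.length = 1
    · rw [if_pos (by simpa using h1), if_pos h1]
      rw [PySem.Chars.join_nil_singletons]
    · rw [if_neg (by simpa using h1), if_neg h1]
      cases hgl : pb.getLast? with
      | none => exact absurd (List.getLast?_eq_none_iff.mp hgl) h0
      | some x =>
        rw [PySem.List.slice_to_neg_one, PySem.List.slice_to_neg_one,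
          PySem.List.pyGet?_neg_one, PySem.List.pyGet?_neg_one,
          List.getLast?_map, hgl, ← List.map_dropLast,
          PySem.Chars.join_nil_singletons]
        rfl

-- ===== VERDICT (by name: the statement is the Claim_ definition above) =====
theorem number_to_hebrew_letters_py_spec : Claim_equal_number_to_hebrew_letters_py := by
  intro num _
  unfold Spec_number_to_hebrew_letters_py
  by_cases hout : num ≤ 0 ∨ 9999 < num
  · rw [number_to_hebrew_letters_py, number_to_hebrew_letters_py_alt, if_pos hout, if_pos hout]
  · have h1 : 1 ≤ num := by omega
    have hmod : PySem.Int.mod num 100 = num % 100 := PySem.Int.mod_eq_emod_of_pos (by omega)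
    simp only [number_to_hebrew_letters_py, number_to_hebrew_letters_py_alt, if_neg hout]
    by_cases h15 : PySem.Int.mod num 100 = 15
    · simp only [if_pos h15]
      rw [pvParts_eq (num - 15) (by omega)]
      exact pvAssemble (pvPartsB (num - 15)) ['ט', '״', 'ו']
    · by_cases h16 : PySem.Int.mod num 100 = 16
      · simp only [if_neg h15, if_pos h16]
        rw [pvParts_eq (num - 16) (by omega)]
        exact pvAssemble (pvPartsB (num - 16)) ['ט', '״', 'ז']
      · simp only [if_neg h15, if_neg h16]
        rw [pvParts_eq num (by omega)]
        exact pvAssemble (pvPartsB num) []
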